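-- pv_equiv track=rewrite | github.com/dohuyminh/Past-Projects-made-during-past-semesters | Swarm_and_bees.py | swarm_busyb
-- ===== SOURCE A (Python) =====
-- def swarm_busyb(trajectories, duration):
--     '''
--     Take the trajectories of the bees in the form of a list and assess
--     whether the longest trajectory of the bees is greater or equal to the
--     given duration's value
--     '''
--     count = []  # Used for counting the time when 2 bees are in the same
--     # co-ordinate for later assessment
--
--     each_duration = []  # Record the longest mutual trajectory between the
--     # assessing bee with other bees
--
--     max_duration = []  # Record the longest mutual trajectory of the assessing
--     # bee based on each_duration
--
--     assess = []  # Used to group the consecutive co-ordinates where the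
--     # assessing bees are
--
--     counter = 0  # 0 is for not in the same co-ordinate, 1 is for the same
--     # co-ordinate
--
--     # Assess every trajectory of every bee
--     for a in range(0, len(trajectories)):
--
--         # Compare the trajectory of one bee with the others'
--         for b in range(0, len(trajectories)):
--             if trajectories[b] == trajectories[a]:
--                 each_duration.append(0)
--             else:
--
--                 # Count the number of mutual positions of assessing bees
--                 for c in range(0, len(trajectories[b])):
--                     if trajectories[b][c] == trajectories[a][c]:
--                         count.append(1)
--                     else:
--                         count.append(0)
--
--                 # Count the longest duration of each bee
--                 for d in range(0, len(count)):
--                     if count[d] == 1: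
--                         if d == len(count) - 1:
--                             counter += 1
--                             assess.append(counter)
--                         else:
--                             counter += 1
--                     if count[d] == 0:
--                         assess.append(counter)
--                         counter = 0
--
--                 # Add the longest mutual trajectory of each bee
--                 each_duration.append(max(assess))
--                 assess.clear()
--                 count.clear()
--                 counter = 0
--
--         # Collect the maximum value of each bee's mutual trajaectory
--         max_duration.append(max(each_duration))
--         each_duration.clear()
--
--     # Compare the longest trajectories duration to the given duration
--     return max(max_duration) >= duration
-- ===== SOURCE B (Python) =====
-- def swarm_busyb(trajectories, duration):
--     '''
--     Two bees share a mutual run of length >= duration exactly when two bees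
--     with different full trajectories occupy the same window of `duration`
--     consecutive positions.  Index every (position, window) pair in a dict and
--     report a collision between non-identical trajectories; no run counting,
--     no pairwise comparison.
--     '''
--     # all bees fly over one common time span (and there is at least one bee)
--     L, = {len(s) for s in trajectories}
--     if duration <= 0:
--         return True
--     seen = {}
--     for s in trajectories:
--         for p in range(L - duration + 1):
--             key = (p, s[p:p + duration])
--             t = seen.get(key)
--             if t is None:
--                 seen[key] = s
--             elif t != s:
--                 return True
--     return False
-- ===== Notes on version B (the rewrite author's own statement) =====
-- stated objective: faster
-- what changed: B replaces A's all-pairs run counting by a dictionary keyed on (position, window of length `duration`): every bee's windows are indexed once and a key hit by two non-identical trajectories proves a mutual run >= duration, with no pairwise comparison and no run-length computation at all.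
import Mathlib
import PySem

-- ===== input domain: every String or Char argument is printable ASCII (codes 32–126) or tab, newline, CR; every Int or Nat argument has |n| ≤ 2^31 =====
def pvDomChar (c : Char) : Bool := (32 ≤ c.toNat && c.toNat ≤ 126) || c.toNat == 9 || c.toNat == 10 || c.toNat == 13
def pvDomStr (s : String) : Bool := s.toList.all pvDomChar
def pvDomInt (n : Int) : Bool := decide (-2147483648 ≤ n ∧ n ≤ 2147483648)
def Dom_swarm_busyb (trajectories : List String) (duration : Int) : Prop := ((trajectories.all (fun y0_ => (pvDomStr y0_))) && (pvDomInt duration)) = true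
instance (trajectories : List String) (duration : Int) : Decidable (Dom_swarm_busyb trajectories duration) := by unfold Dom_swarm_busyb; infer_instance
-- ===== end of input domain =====

-- B replaces A's all-pairs run counting by a dict keyed on (position, window of length duration):
-- a key hit by two non-identical trajectories proves a mutual run >= duration; measurably faster.
-- A raises on an empty list (ValueError) and on trajectories of unequal length (IndexError); Pre_ excludes exactly those.


-- ===== PORT A =====
-- count: the 1/0 match list for one pair (trajectories[b][c] == trajectories[a][c])
def pvACount (sb sa : String) : List Int :=
  (PySem.List.pyRange 0 (PySem.Str.len sb) 1).foldl (fun cnt c =>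
    cnt ++ [if PySem.List.pyGetD sb.toList c ' ' = PySem.List.pyGetD sa.toList c ' '
            then (1 : Int) else 0]) []

-- the d-loop over count with (counter, assess) state; two successive ifs as in the Python
def pvAAssess (count : List Int) : Int × List Int :=
  (PySem.List.pyRange 0 (PySem.List.len count) 1).foldl (fun (st : Int × List Int) d =>
    let st1 := if PySem.List.pyGetD count d 0 = 1 then
                 (if d = PySem.List.len count - 1
                  then (st.1 + 1, st.2 ++ [st.1 + 1])
                  else (st.1 + 1, st.2))
               else st
    if PySem.List.pyGetD count d 0 = 0 then (0, st1.2 ++ [st1.1]) else st1)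
    ((0 : Int), ([] : List Int))

-- each_duration: the inner b-loop for one assessing bee
def pvAEach (trajectories : List String) (sa : String) : List Int :=
  (PySem.List.pyRange 0 (PySem.List.len trajectories) 1).foldl (fun ed b =>
    let sb := PySem.List.pyGetD trajectories b ""
    if sb = sa then ed ++ [(0 : Int)]
    else ed ++ [(PySem.List.max? (pvAAssess (pvACount sb sa)).2 (fun x => x)).getD 0]) []

def swarm_busyb (trajectories : List String) (duration : Int) : Bool :=
  -- max_duration built by the outer a-loop
  let md : List Int :=
    (PySem.List.pyRange 0 (PySem.List.len trajectories) 1).foldl (fun md a =>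
      md ++ [(PySem.List.max? (pvAEach trajectories (PySem.List.pyGetD trajectories a ""))
              (fun x => x)).getD 0]) []
  decide (duration ≤ (PySem.List.max? md (fun x => x)).getD 0)

-- ===== PORT B =====
-- one step of Source B's inner position loop: look the key (p, s[p:p+duration]) up, insert if absent,
-- report a hit by a non-identical trajectory ('return True' is carried as the Bool flag)
def pvBStep (d : Int) (s : String) (st : Bool × PySem.Dict (Int × String) String) (p : Int) :
    Bool × PySem.Dict (Int × String) String :=
  if st.1 then st else
    match st.2.get? (p, PySem.Str.slice s (some p) (some (p + d))) with
    | none => (st.1, st.2.insert (p, PySem.Str.slice s (some p) (some (p + d))) s)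
    | some t => if t ≠ s then (true, st.2) else st

-- 'for p in range(L - duration + 1)'
def pvBInner (d L : Int) (s : String) (st : Bool × PySem.Dict (Int × String) String) :
    Bool × PySem.Dict (Int × String) String :=
  (PySem.List.pyRange 0 (L - d + 1) 1).foldl (pvBStep d s) st

-- 'L, = {len(s) for s in trajectories}' raises unless the set is a singleton (outside Pre_);
-- the '| _' arm only makes the port total there, nothing is claimed about it
def swarm_busyb_alt (trajectories : List String) (duration : Int) : Bool :=
  match PySem.Set.ofList (trajectories.map (fun s => PySem.Str.len s)) with
  | [L] =>
      if duration ≤ 0 then true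
      else
        (trajectories.foldl (fun st s => if st.1 then st else pvBInner duration L s st)
          (false, PySem.Dict.empty)).1
  | _ => false

-- ===== PRECONDITION & SPEC =====
-- Pre_ excludes exactly the inputs where A raises: the empty list (max([]) is a ValueError)
-- and lists whose trajectories differ in length (trajectories[a][c] is an IndexError).
def Pre_swarm_busyb (trajectories : List String) (duration : Int) : Prop :=
  trajectories ≠ [] ∧
    ∀ s ∈ trajectories, ∀ t ∈ trajectories, s.toList.length = t.toList.length
instance (trajectories : List String) (duration : Int) : Decidable (Pre_swarm_busyb trajectories duration) := by unfold Pre_swarm_busyb; infer_instance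

def pvWitness_swarm_busyb : List String × Int := (["abc", "abd", "xbd"], 2)

def Spec_swarm_busyb (trajectories : List String) (duration : Int) (out : Bool) : Prop := out = swarm_busyb_alt trajectories duration
instance (trajectories : List String) (duration : Int) (out : Bool) : Decidable (Spec_swarm_busyb trajectories duration out) := by unfold Spec_swarm_busyb; infer_instance

-- ===== CLAIM (what is proved, stated in full; the proofs are below) =====
def Claim_equal_swarm_busyb : Prop := ∀ (trajectories : List String) (duration : Int), Dom_swarm_busyb trajectories duration → Pre_swarm_busyb trajectories duration → Spec_swarm_busyb trajectories duration (swarm_busyb trajectories duration)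

-- ===== LEMMAS AND PROOFS =====

-- fold-max over a list through a valuation
def pvSup {α : Type} (f : α → Int) (l : List α) : Int :=
  l.foldl (fun acc x => max acc (f x)) 0

theorem pvFold_le {α : Type} (f : α → Int) (K : Int) :
    ∀ (l : List α) (b : Int), b ≤ K → (∀ x ∈ l, f x ≤ K) →
      l.foldl (fun acc x => max acc (f x)) b ≤ K := by
  intro l
  induction l with
  | nil => intro b hb _; simpa using hb
  | cons x l ih =>
      intro b hb h
      simp only [List.foldl_cons]
      exact ih _ (by have := h x (by simp); omega) (fun y hy => h y (by simp [hy]))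

theorem pvSup_le {α : Type} (f : α → Int) (l : List α) (K : Int) (hK : 0 ≤ K)
    (h : ∀ x ∈ l, f x ≤ K) : pvSup f l ≤ K :=
  pvFold_le f K l 0 hK h

theorem pvSup_init {α : Type} (f : α → Int) :
    ∀ (l : List α), (∀ x ∈ l, 0 ≤ f x) → ∀ (b : Int), 0 ≤ b →
      l.foldl (fun acc x => max acc (f x)) b = max b (pvSup f l) := by
  intro l
  induction l with
  | nil => intro _ b hb; simp [pvSup]; omega
  | cons x l ih =>
      intro hf b hb
      have hx : 0 ≤ f x := hf x (by simp)
      have hf' : ∀ y ∈ l, 0 ≤ f y := fun y hy => hf y (by simp [hy])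
      have h1 := ih hf' (max b (f x)) (by omega)
      have h2 := ih hf' (max 0 (f x)) (by omega)
      simp only [List.foldl_cons, pvSup] at *
      omega

theorem pv_le_sup {α : Type} (f : α → Int) (l : List α)
    (hf : ∀ x ∈ l, 0 ≤ f x) (x : α) (hx : x ∈ l) : f x ≤ pvSup f l := by
  induction l with
  | nil => cases hx
  | cons y l ih =>
      have hf' : ∀ z ∈ l, 0 ≤ f z := fun z hz => hf z (by simp [hz])
      simp only [pvSup, List.foldl_cons]
      rw [pvSup_init f l hf' (max 0 (f y)) (by have := hf y (by simp); omega)]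
      rcases List.mem_cons.mp hx with h | h
      · subst h; omega
      · have := ih hf' h; omega

-- existence direction of the fold-max
theorem pvFold_ex {α : Type} (f : α → Int) (dd : Int) :
    ∀ (l : List α) (b : Int), dd ≤ l.foldl (fun acc x => max acc (f x)) b →
      dd ≤ b ∨ ∃ x ∈ l, dd ≤ f x := by
  intro l
  induction l with
  | nil => intro b hb; exact Or.inl (by simpa using hb)
  | cons x l ih =>
      intro b hb
      simp only [List.foldl_cons] at hb
      rcases ih (max b (f x)) hb with h | ⟨y, hy, hdy⟩
      · rcases le_max_iff.mp h with h | h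
        · exact Or.inl h
        · exact Or.inr ⟨x, by simp, h⟩
      · exact Or.inr ⟨y, by simp [hy], hdy⟩

-- Python max(l) (first extremum) agrees with fold-max-from-0 on nonempty nonnegative lists
theorem pvMaxGetD (l : List Int) (hne : l ≠ []) (hpos : ∀ x ∈ l, 0 ≤ x) :
    (PySem.List.max? l (fun x => x)).getD 0 = pvSup (fun x => x) l := by
  cases hm : PySem.List.max? l (fun x => x) with
  | none => exact absurd ((PySem.List.max?_eq_none_iff _ _).mp hm) hne
  | some m =>
      have hmem : m ∈ l := PySem.List.max?_mem hm
      have hmax : ∀ y ∈ l, y ≤ m := fun y hy => PySem.List.max?_isMax hm y hy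
      simp only [Option.getD_some]
      exact le_antisymm (pv_le_sup _ _ hpos m hmem) (pvSup_le _ _ _ (hpos m hmem) hmax)

-- the 0/1 form of the best-run scan (used only to characterise A)
def pvStep01 (cb : Int × Int) (x : Int) : Int × Int :=
  if x = 1 then (cb.1 + 1, if cb.2 < cb.1 + 1 then cb.1 + 1 else cb.2) else (0, cb.2)

def pvScan01 (l : List Int) (st : Int × Int) : Int × Int := l.foldl pvStep01 st

theorem pvStep01_one (cb : Int × Int) : pvStep01 cb 1 = (cb.1 + 1, max cb.2 (cb.1 + 1)) := by
  unfold pvStep01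
  rw [if_pos rfl]
  have : (if cb.2 < cb.1 + 1 then cb.1 + 1 else cb.2) = max cb.2 (cb.1 + 1) := by split <;> omega
  rw [this]

theorem pvStep01_ne (cb : Int × Int) (x : Int) (h : x ≠ 1) : pvStep01 cb x = (0, cb.2) := by
  unfold pvStep01; rw [if_neg h]

-- match vector of a pair of trajectories (what A calls `count`)
def pvMV (s t : List Char) : List Int :=
  (s.zip t).map (fun p => if p.1 = p.2 then (1 : Int) else 0)

theorem pvMV_all01 (s t : List Char) : ∀ x ∈ pvMV s t, x = 0 ∨ x = 1 := by
  intro x hx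
  simp only [pvMV, List.mem_map] at hx
  obtain ⟨p, _, hp⟩ := hx
  by_cases h : p.1 = p.2 <;> simp [h] at hp <;> omega

theorem pvScan01_carry (l : List Int) :
    ∀ c b : Int, 0 ≤ c → 0 ≤ b →
      (pvScan01 l (c, b)).2 = max b ((pvScan01 l (c, 0)).2) := by
  induction l with
  | nil => intro c b _ hb; simp [pvScan01]; omega
  | cons x l ih =>
      intro c b hc hb
      simp only [pvScan01, List.foldl_cons]
      by_cases h : x = 1
      · subst h
        rw [pvStep01_one, pvStep01_one]
        dsimp only
        have h1 := ih (c + 1) (max b (c + 1)) (by omega) (by omega)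
        have h2 := ih (c + 1) (max 0 (c + 1)) (by omega) (by omega)
        have h3 := ih (c + 1) 0 (by omega) le_rfl
        simp only [pvScan01] at h1 h2 h3 ⊢
        omega
      · rw [pvStep01_ne _ _ h, pvStep01_ne _ _ h]
        have h1 := ih 0 b le_rfl hb
        have h2 := ih 0 0 le_rfl le_rfl
        simp only [pvScan01] at h1 h2 ⊢
        omega

-- A's d-loop over `count`, as structural recursion ("rest = []" is Python's d == len(count)-1)
def pvGoA : List Int → Int → List Int → Int × List Int
  | [], c, ass => (c, ass)
  | x :: rest, c, ass =>
      let st1 := if x = 1 then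
                   (if rest = [] then (c + 1, ass ++ [c + 1]) else (c + 1, ass))
                 else (c, ass)
      let st2 := if x = 0 then (0, st1.2 ++ [st1.1]) else st1
      pvGoA rest st2.1 st2.2

-- bridge: the port's index loop over pyRange equals pvGoA on the dropped suffix
theorem pvGoA_bridge (count : List Int) :
    ∀ (j k : Nat), count.length - k = j → ∀ (st : Int × List Int),
      (PySem.List.pyRange (k : Int) (count.length : Int) 1).foldl
        (fun (st : Int × List Int) d =>
          let st1 := if PySem.List.pyGetD count d 0 = 1 then
                       (if d = (count.length : Int) - 1
                        then (st.1 + 1, st.2 ++ [st.1 + 1])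
                        else (st.1 + 1, st.2))
                     else st
          if PySem.List.pyGetD count d 0 = 0 then (0, st1.2 ++ [st1.1]) else st1) st
      = pvGoA (count.drop k) st.1 st.2 := by
  intro j
  induction j with
  | zero =>
      intro k hk st
      have hk' : count.length ≤ k := by omega
      rw [PySem.List.pyRange_one_eq_nil (by exact_mod_cast hk'), List.drop_of_length_le hk']
      simp [pvGoA]
  | succ j ih =>
      intro k hk st
      have hklt : k < count.length := by omega
      rw [PySem.List.pyRange_one_cons (by exact_mod_cast hklt), List.foldl_cons,
        List.drop_eq_getElem_cons hklt]
      have hget : PySem.List.pyGetD count (k : Int) 0 = count[k] := by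
        rw [PySem.List.pyGetD_natCast]; exact List.getD_eq_getElem _ _ hklt
      have hlast : ((k : Int) = (count.length : Int) - 1) ↔ (count.drop (k + 1) = []) := by
        rw [List.drop_eq_nil_iff]; constructor <;> intro h <;> omega
      have hcast : ((k : Int) + 1) = (((k + 1 : Nat)) : Int) := by push_cast; ring
      have hrec := ih (k + 1) (by omega)
      unfold pvGoA
      simp only [hget]
      by_cases h1 : count[k] = 1
      · have h0 : ¬ count[k] = 0 := by omega
        by_cases hl : count.drop (k + 1) = []
        · simp only [if_pos h1, if_neg h0, if_pos (hlast.mpr hl), if_pos hl, hcast]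
          exact hrec _
        · simp only [if_pos h1, if_neg h0, if_neg (fun h => hl (hlast.mp h)), if_neg hl, hcast]
          exact hrec _
      · by_cases h0 : count[k] = 0
        · simp only [if_neg h1, if_pos h0, hcast]; exact hrec _
        · simp only [if_neg h1, if_neg h0, hcast]; exact hrec _

theorem pvSup_append_singleton (ass : List Int) (y : Int) :
    pvSup (fun x => x) (ass ++ [y]) = max (pvSup (fun x => x) ass) y := by
  simp [pvSup, List.foldl_append]

-- the assess list pvGoA produces: nonneg entries and nonempty
theorem pvGoA_nonneg (L : List Int) :
    ∀ (c : Int) (ass : List Int), 0 ≤ c → (∀ x ∈ ass, 0 ≤ x) →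
      ∀ y ∈ (pvGoA L c ass).2, 0 ≤ y := by
  induction L with
  | nil => intro c ass _ hass y hy; exact hass y hy
  | cons x rest ih =>
      intro c ass hc hass
      unfold pvGoA
      have happ : ∀ (z : Int), 0 ≤ z → ∀ y ∈ ass ++ [z], 0 ≤ y := by
        intro z hz y hy
        rcases List.mem_append.mp hy with h | h
        · exact hass y h
        · simp at h; omega
      by_cases h1 : x = 1
      · have h0 : ¬ x = 0 := by omega
        by_cases hl : rest = []
        · simp only [if_pos h1, if_neg h0, if_pos hl]
          exact ih _ _ (by omega) (happ _ (by omega))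
        · simp only [if_pos h1, if_neg h0, if_neg hl]
          exact ih _ _ (by omega) hass
      · by_cases h0 : x = 0
        · simp only [if_neg h1, if_pos h0]
          exact ih _ _ le_rfl (happ _ hc)
        · simp only [if_neg h1, if_neg h0]
          exact ih _ _ hc hass

theorem pvGoA_ne_nil (L : List Int) (h01 : ∀ x ∈ L, x = 0 ∨ x = 1) :
    ∀ (c : Int) (ass : List Int), L ≠ [] → (pvGoA L c ass).2 ≠ [] := by
  induction L with
  | nil => intro c ass h; exact absurd rfl h
  | cons x rest ih =>
      intro c ass _
      unfold pvGoA
      rcases h01 x (by simp) with h0 | h1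
      · by_cases hl : rest = []
        · subst hl
          simp only [if_neg (by omega : ¬ x = 1), if_pos h0, pvGoA]
          simp
        · simp only [if_neg (by omega : ¬ x = 1), if_pos h0]
          exact ih (fun y hy => h01 y (by simp [hy])) _ _ hl
      · by_cases hl : rest = []
        · subst hl
          simp only [if_pos h1, if_neg (by omega : ¬ x = 0), pvGoA]
          simp
        · simp only [if_pos h1, if_neg hl, if_neg (by omega : ¬ x = 0)]
          exact ih (fun y hy => h01 y (by simp [hy])) _ _ hl

theorem pvFold_init_le {α : Type} (f : α → Int) :
    ∀ (l : List α) (b : Int), b ≤ l.foldl (fun acc x => max acc (f x)) b := by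
  intro l
  induction l with
  | nil => intro b; simp
  | cons x l ih =>
      intro b
      simp only [List.foldl_cons]
      have := ih (max b (f x))
      omega

theorem pvSup_nonneg' {α : Type} (f : α → Int) (l : List α) : 0 ≤ pvSup f l :=
  pvFold_init_le f l 0

-- the central per-pair fact: A's run-list maximum is the best-run scan of the match vector
theorem pvGoA_scan (L : List Int) (h01 : ∀ x ∈ L, x = 0 ∨ x = 1) :
    ∀ (c : Int) (ass : List Int), 0 ≤ c → L ≠ [] →
      pvSup (fun x => x) ((pvGoA L c ass).2)
        = max (pvSup (fun x => x) ass) ((pvScan01 L (c, c)).2) := by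
  induction L with
  | nil => intro c ass _ h; exact absurd rfl h
  | cons x rest ih =>
      intro c ass hc _
      have h01' : ∀ y ∈ rest, y = 0 ∨ y = 1 := fun y hy => h01 y (by simp [hy])
      unfold pvGoA
      simp only [pvScan01, List.foldl_cons]
      rcases h01 x (by simp) with h0 | h1
      · subst h0
        rw [if_neg (by norm_num : ¬ (0:Int) = 1), if_pos rfl,
          pvStep01_ne _ _ (by norm_num : (0:Int) ≠ 1)]
        dsimp only
        by_cases hl : rest = []
        · subst hl
          simp only [pvGoA, List.foldl_nil]
          rw [pvSup_append_singleton]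
        · have := ih h01' 0 (ass ++ [c]) le_rfl hl
          simp only [pvScan01] at this
          rw [this, pvSup_append_singleton]
          have hcar := pvScan01_carry rest 0 c le_rfl hc
          simp only [pvScan01] at hcar
          rw [hcar]
          omega
      · subst h1
        rw [if_pos rfl, if_neg (by norm_num : ¬ (1:Int) = 0), pvStep01_one]
        dsimp only
        have hmx : max c (c + 1) = c + 1 := by omega
        rw [hmx]
        by_cases hl : rest = []
        · subst hl
          rw [if_pos rfl]
          dsimp only
          simp only [pvGoA, List.foldl_nil]
          rw [pvSup_append_singleton]
        · rw [if_neg hl]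
          dsimp only
          have := ih h01' (c + 1) ass (by omega) hl
          simp only [pvScan01] at this
          rw [this]

-- the best-run function in recursive form
def pvF : List Int → Int → Int
  | [], _ => 0
  | x :: rest, c => if x = 1 then max (c + 1) (pvF rest (c + 1)) else pvF rest 0

theorem pvF_eq_scan : ∀ (v : List Int) (c : Int), 0 ≤ c → (pvScan01 v (c, 0)).2 = pvF v c := by
  intro v
  induction v with
  | nil => intro c _; simp [pvScan01, pvF]
  | cons x rest ih =>
      intro c hc
      simp only [pvScan01, List.foldl_cons, pvF]
      by_cases h : x = 1
      · subst h
        rw [pvStep01_one, if_pos rfl]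
        dsimp only
        have hmx : max (0 : Int) (c + 1) = c + 1 := by omega
        rw [hmx]
        have hcar := pvScan01_carry rest (c + 1) (c + 1) (by omega) (by omega)
        have ih' := ih (c + 1) (by omega)
        simp only [pvScan01] at hcar ih' ⊢
        rw [hcar, ih']
      · rw [pvStep01_ne _ _ h, if_neg h]
        exact ih 0 le_rfl

theorem pvF_nonneg : ∀ (v : List Int) (c : Int), 0 ≤ pvF v c := by
  intro v
  induction v with
  | nil => intro c; simp [pvF]
  | cons x rest ih =>
      intro c
      simp only [pvF]
      by_cases h : x = 1
      · rw [if_pos h]; have := ih (c + 1); omega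
      · rw [if_neg h]; exact ih 0

theorem pvF_mono : ∀ (v : List Int) (c c' : Int), c' ≤ c → pvF v c' ≤ pvF v c := by
  intro v
  induction v with
  | nil => intro c c' _; simp [pvF]
  | cons x rest ih =>
      intro c c' hcc
      simp only [pvF]
      by_cases h : x = 1
      · rw [if_pos h, if_pos h]
        have := ih (c + 1) (c' + 1) (by omega)
        omega
      · rw [if_neg h, if_neg h]

theorem pvF_cons_one (rest : List Int) (c : Int) :
    pvF ((1 : Int) :: rest) c = max (c + 1) (pvF rest (c + 1)) := by
  simp [pvF]

theorem pvF_prefix : ∀ (k : Nat) (v : List Int) (c : Int), 1 ≤ k →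
    v.take k = List.replicate k 1 → k ≤ v.length → c + k ≤ pvF v c := by
  intro k
  induction k with
  | zero => intro v c h; omega
  | succ k ih =>
      intro v c _ htake hlen
      cases v with
      | nil => simp at hlen
      | cons x rest =>
          simp only [List.take_succ_cons, List.replicate_succ, List.cons.injEq] at htake
          obtain ⟨hx, hrest⟩ := htake
          subst hx
          rw [pvF_cons_one]
          rcases Nat.eq_zero_or_pos k with hk0 | hk1
          · subst hk0
            have := pvF_nonneg rest (c + 1)
            have hc1 : ((0 + 1 : Nat) : Int) = 1 := by norm_num
            rw [hc1]
            omega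
          · have hlen' : k ≤ rest.length := by
              simp only [List.length_cons] at hlen; omega
            have hk := ih rest (c + 1) hk1 hrest hlen'
            have hc1 : ((k + 1 : Nat) : Int) = (k : Int) + 1 := by push_cast; ring
            rw [hc1]
            omega

theorem pvF_win : ∀ (p : Nat) (v : List Int) (c : Int) (dn : Nat), 1 ≤ dn → 0 ≤ c →
    p + dn ≤ v.length → (v.drop p).take dn = List.replicate dn 1 →
    (dn : Int) ≤ pvF v c := by
  intro p
  induction p with
  | zero =>
      intro v c dn h1 hc hlen htake
      simp only [List.drop_zero] at htake
      have := pvF_prefix dn v c h1 htake (by omega)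
      omega
  | succ p ih =>
      intro v c dn h1 hc hlen htake
      cases v with
      | nil => simp at hlen
      | cons x rest =>
          simp only [List.drop_succ_cons] at htake
          have hr : (dn : Int) ≤ pvF rest 0 :=
            ih rest 0 dn h1 le_rfl
              (by simp only [List.length_cons] at hlen; omega) htake
          simp only [pvF]
          by_cases h : x = 1
          · rw [if_pos h]
            have := pvF_mono rest (c + 1) 0 (by omega)
            omega
          · rw [if_neg h]; exact hr

theorem pvF_ex : ∀ (v : List Int) (c : Int) (dn : Nat), 1 ≤ dn → 0 ≤ c →
    (dn : Int) ≤ pvF v c →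
    (∃ k : Nat, 1 ≤ k ∧ k ≤ v.length ∧ v.take k = List.replicate k 1 ∧ (dn : Int) ≤ c + k) ∨
    (∃ p : Nat, 1 ≤ p ∧ p + dn ≤ v.length ∧ (v.drop p).take dn = List.replicate dn 1) := by
  intro v
  induction v with
  | nil =>
      intro c dn h1 _ hle
      simp only [pvF] at hle
      omega
  | cons x rest ih =>
      intro c dn h1 hc hle
      simp only [pvF] at hle
      by_cases h : x = 1
      · subst h
        rw [if_pos rfl] at hle
        by_cases hd : (dn : Int) ≤ c + 1
        · refine Or.inl ⟨1, le_rfl, by simp, by simp, by omega⟩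
        · have hle' : (dn : Int) ≤ pvF rest (c + 1) := by omega
          rcases ih (c + 1) dn h1 (by omega) hle' with ⟨k, hk1, hklen, hktake, hkle⟩ | ⟨p, hp1, hplen, hptake⟩
          · refine Or.inl ⟨k + 1, by omega, by simp; omega, ?_, by push_cast at *; omega⟩
            simp [List.replicate_succ, hktake]
          · refine Or.inr ⟨p + 1, by omega, by simp; omega, by simpa using hptake⟩
      · rw [if_neg h] at hle
        rcases ih 0 dn h1 le_rfl hle with ⟨k, hk1, hklen, hktake, hkle⟩ | ⟨p, hp1, hplen, hptake⟩
        · have hdk : dn ≤ k := by omega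
          refine Or.inr ⟨1, le_rfl, by simp; omega, ?_⟩
          have : rest.take dn = (rest.take k).take dn := by
            rw [List.take_take, min_eq_left hdk]
          simp only [List.drop_succ_cons, List.drop_zero]
          rw [this, hktake, List.take_replicate, min_eq_left hdk]
        · exact Or.inr ⟨p + 1, by omega, by simp; omega, by simpa using hptake⟩

theorem pvF_iff (v : List Int) (dn : Nat) (h1 : 1 ≤ dn) :
    (dn : Int) ≤ pvF v 0 ↔
      ∃ p : Nat, p + dn ≤ v.length ∧ (v.drop p).take dn = List.replicate dn 1 := by
  constructor
  · intro h
    rcases pvF_ex v 0 dn h1 le_rfl h with ⟨k, hk1, hklen, hktake, hkle⟩ | ⟨p, _, hplen, hptake⟩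
    · have hdk : dn ≤ k := by omega
      refine ⟨0, by omega, ?_⟩
      have : v.take dn = (v.take k).take dn := by
        rw [List.take_take, min_eq_left hdk]
      simp only [List.drop_zero]
      rw [this, hktake, List.take_replicate, min_eq_left hdk]
    · exact ⟨p, hplen, hptake⟩
  · rintro ⟨p, hplen, hptake⟩
    exact pvF_win p v 0 dn h1 le_rfl hplen hptake

-- the common per-pair value: 0 for equal strings, else the best run of the match vector
def pvG (s t : String) : Int := if s = t then 0 else pvF (pvMV s.toList t.toList) 0

theorem pvG_nonneg (s t : String) : 0 ≤ pvG s t := by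
  unfold pvG; split
  · omega
  · exact pvF_nonneg _ _

theorem pvSup_map {α : Type} (f : α → Int) (l : List α) :
    pvSup (fun x => x) (l.map f) = pvSup f l := by
  simp [pvSup, List.foldl_map]

-- the port's count loop builds the match vector (equal lengths)
theorem pvCount_eq (sb sa : String) (hlen : sb.toList.length = sa.toList.length) :
    pvACount sb sa = pvMV sb.toList sa.toList := by
  unfold pvACount
  have hsl : PySem.Str.len sb = (sb.toList.length : Int) := by
    simp [PySem.Str.len_eq]
  rw [hsl, PySem.List.foldl_append_singleton_eq_map, List.nil_append,
    PySem.List.pyRange_zero_nat, List.map_map]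
  apply List.ext_getElem
  · simp [pvMV, hlen]
  · intro i h1 h2
    simp only [List.getElem_map, List.getElem_range, Function.comp_apply, pvMV,
      List.getElem_zip]
    have hi : i < sb.toList.length := by simpa using h1
    rw [PySem.List.pyGetD_natCast, PySem.List.pyGetD_natCast,
      List.getD_eq_getElem _ _ hi, List.getD_eq_getElem _ _ (by omega : i < sa.toList.length)]

-- the port's whole else-branch for one pair equals pvG
theorem pvPairA (sb sa : String) (hne : sb ≠ sa)
    (hlen : sb.toList.length = sa.toList.length) :
    (PySem.List.max? (pvAAssess (pvMV sb.toList sa.toList)).2 (fun x => x)).getD 0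
      = pvG sb sa := by
  unfold pvAAssess
  have h01 := pvMV_all01 sb.toList sa.toList
  have hcne : pvMV sb.toList sa.toList ≠ [] := by
    intro h
    have hz : (sb.toList.zip sa.toList).length = 0 := by
      have := congrArg List.length h
      simpa [pvMV] using this
    rw [List.length_zip, hlen, min_self] at hz
    have hsa : sa.toList = [] := List.eq_nil_of_length_eq_zero hz
    have hsb : sb.toList = [] := List.eq_nil_of_length_eq_zero (by omega)
    exact hne (String.toList_inj.mp (hsb.trans hsa.symm))
  have hlsl : PySem.List.len (pvMV sb.toList sa.toList)
      = ((pvMV sb.toList sa.toList).length : Int) := by simp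
  rw [hlsl]
  have hbr := pvGoA_bridge (pvMV sb.toList sa.toList) (pvMV sb.toList sa.toList).length 0
    (by omega) (0, [])
  rw [show (((0 : Nat)) : Int) = 0 from rfl, List.drop_zero] at hbr
  rw [hbr]
  rw [pvMaxGetD _ (pvGoA_ne_nil _ h01 _ _ hcne)
    (pvGoA_nonneg _ _ _ le_rfl (by intro x hx; cases hx))]
  rw [pvGoA_scan _ h01 0 [] le_rfl hcne]
  have hval : pvSup (fun x => x) ([] : List Int) = 0 := by simp [pvSup]
  rw [hval]
  have hF := pvF_eq_scan (pvMV sb.toList sa.toList) 0 le_rfl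
  have hnn := pvF_nonneg (pvMV sb.toList sa.toList) 0
  rw [pvG, if_neg hne, ← hF]
  omega

-- characterization of port A under Pre_
theorem pvAval (ts : List String) (dur : Int) (hne : ts ≠ [])
    (hlen : ∀ s ∈ ts, ∀ t ∈ ts, s.toList.length = t.toList.length) :
    swarm_busyb ts dur
      = decide (dur ≤ pvSup (fun sa => pvSup (fun sb => pvG sb sa) ts) ts) := by
  unfold swarm_busyb
  simp only [PySem.List.len_eq]
  refine congrArg (fun v : Int => decide (dur ≤ v)) ?_
  rw [PySem.List.foldl_pyRange_zero_pyGetD' ts "" (fun (md : List Int) sa =>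
    md ++ [(PySem.List.max? (pvAEach ts sa) (fun x => x)).getD 0]) []]
  have hrow : ∀ sa ∈ ts, ∀ (md : List Int),
      md ++ [(PySem.List.max? (pvAEach ts sa) (fun x => x)).getD 0]
        = md ++ [pvSup (fun sb => pvG sb sa) ts] := by
    intro sa hsa md
    congr 1
    unfold pvAEach
    simp only [PySem.List.len_eq]
    rw [PySem.List.foldl_pyRange_zero_pyGetD' ts "" (fun (ed : List Int) sb =>
      if sb = sa then ed ++ [(0 : Int)]
      else ed ++ [(PySem.List.max? (pvAAssess (pvACount sb sa)).2 (fun x => x)).getD 0]) []]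
    have hcell : ∀ sb ∈ ts, ∀ (ed : List Int),
        (if sb = sa then ed ++ [(0 : Int)]
         else ed ++ [(PySem.List.max? (pvAAssess (pvACount sb sa)).2 (fun x => x)).getD 0])
          = ed ++ [pvG sb sa] := by
      intro sb hsb ed
      by_cases h : sb = sa
      · rw [if_pos h]
        have : pvG sb sa = 0 := by rw [pvG, if_pos h]
        rw [this]
      · rw [if_neg h]
        rw [pvCount_eq sb sa (hlen sb hsb sa hsa)]
        rw [pvPairA sb sa h (hlen sb hsb sa hsa)]
    rw [PySem.List.foldl_congr_mem' ts _ _ [] hcell]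
    rw [PySem.List.foldl_append_singleton_eq_map, List.nil_append]
    rw [pvMaxGetD _ (by simpa using hne)
      (by
        intro y hy
        rcases List.mem_map.mp hy with ⟨sb, _, rfl⟩
        exact pvG_nonneg _ _)]
    rw [pvSup_map]
  rw [PySem.List.foldl_congr_mem' ts _ _ [] hrow]
  rw [PySem.List.foldl_append_singleton_eq_map, List.nil_append]
  rw [pvMaxGetD _ (by simpa using hne)
    (by
      intro y hy
      rcases List.mem_map.mp hy with ⟨sa, _, rfl⟩
      exact pvSup_nonneg' _ _)]
  rw [pvSup_map]

-- windows of the match vector are matching windows of the strings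
theorem pvMV_length (a b : List Char) : (pvMV a b).length = min a.length b.length := by
  simp [pvMV]

theorem pvMV_drop : ∀ (p : Nat) (a b : List Char),
    (pvMV a b).drop p = pvMV (a.drop p) (b.drop p) := by
  intro p
  induction p with
  | zero => intro a b; simp
  | succ p ih =>
      intro a b
      cases a with
      | nil => simp [pvMV]
      | cons x a' =>
          cases b with
          | nil => simp [pvMV]
          | cons y b' =>
              simp only [pvMV, List.zip_cons_cons, List.map_cons, List.drop_succ_cons]
              exact ih a' b'

theorem pvMV_take_repl : ∀ (k : Nat) (a b : List Char), k ≤ a.length → k ≤ b.length →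
    ((pvMV a b).take k = List.replicate k 1 ↔ a.take k = b.take k) := by
  intro k
  induction k with
  | zero => intro a b _ _; simp
  | succ k ih =>
      intro a b ha hb
      cases a with
      | nil => simp at ha
      | cons x a' =>
          cases b with
          | nil => simp at hb
          | cons y b' =>
              simp only [pvMV, List.zip_cons_cons, List.map_cons, List.take_succ_cons,
                List.replicate_succ, List.cons.injEq]
              constructor
              · rintro ⟨h1, h2⟩
                have hxy : x = y := by
                  by_cases h : x = y
                  · exact h
                  · simp [h] at h1
                exact ⟨hxy, ((ih a' b' (by simpa using ha) (by simpa using hb)).mp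
                  (by simpa [pvMV] using h2))⟩
              · rintro ⟨h1, h2⟩
                refine ⟨by simp [h1], ?_⟩
                simpa [pvMV] using
                  (ih a' b' (by simpa using ha) (by simpa using hb)).mpr h2

theorem pvWin_iff (a b : List Char) (dn p : Nat) (hp : p + dn ≤ a.length)
    (hlen : a.length = b.length) :
    ((pvMV a b).drop p).take dn = List.replicate dn 1 ↔
      (a.drop p).take dn = (b.drop p).take dn := by
  rw [pvMV_drop]
  exact pvMV_take_repl dn (a.drop p) (b.drop p) (by simp; omega) (by simp; omega)

-- a collision: two non-identical trajectories matching on a full window of length d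
def pvColl (ts : List String) (d : Int) : Prop :=
  ∃ s ∈ ts, ∃ t ∈ ts, s ≠ t ∧ ∃ p : Nat, p + d.toNat ≤ s.toList.length ∧
    (s.toList.drop p).take d.toNat = (t.toList.drop p).take d.toNat

theorem pvG_ge_iff (s t : String) (hst : s ≠ t)
    (hlen : s.toList.length = t.toList.length) (d : Int) (hd : 1 ≤ d) :
    d ≤ pvG s t ↔ ∃ p : Nat, p + d.toNat ≤ s.toList.length ∧
      (s.toList.drop p).take d.toNat = (t.toList.drop p).take d.toNat := by
  have hdn : ((d.toNat : Int)) = d := Int.toNat_of_nonneg (by omega)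
  have h1 : 1 ≤ d.toNat := by omega
  rw [pvG, if_neg hst, ← hdn, pvF_iff _ _ h1]
  constructor
  · rintro ⟨p, hp, htake⟩
    rw [pvMV_length, hlen, min_self] at hp
    exact ⟨p, by omega, (pvWin_iff s.toList t.toList d.toNat p (by omega) hlen).mp htake⟩
  · rintro ⟨p, hp, htake⟩
    refine ⟨p, ?_, (pvWin_iff s.toList t.toList d.toNat p hp hlen).mpr htake⟩
    rw [pvMV_length, hlen, min_self]
    omega

-- A-side: the double max is at least d exactly when a collision exists
theorem pvA_iff (ts : List String) (d : Int) (hd : 1 ≤ d)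
    (hlen : ∀ s ∈ ts, ∀ t ∈ ts, s.toList.length = t.toList.length) :
    d ≤ pvSup (fun sa => pvSup (fun sb => pvG sb sa) ts) ts ↔ pvColl ts d := by
  constructor
  · intro h
    rcases pvFold_ex _ d ts 0 h with h0 | ⟨sa, hsa, hda⟩
    · omega
    rcases pvFold_ex _ d ts 0 hda with h0 | ⟨sb, hsb, hdb⟩
    · omega
    have hne : sb ≠ sa := by
      intro he
      rw [pvG, if_pos he] at hdb
      omega
    rcases (pvG_ge_iff sb sa hne (hlen sb hsb sa hsa) d hd).mp hdb with ⟨p, hp, htake⟩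
    exact ⟨sb, hsb, sa, hsa, hne, p, hp, htake⟩
  · rintro ⟨s, hs, t, ht, hst, p, hp, htake⟩
    have h1 : d ≤ pvG s t :=
      (pvG_ge_iff s t hst (hlen s hs t ht) d hd).mpr ⟨p, hp, htake⟩
    have h2 : pvG s t ≤ pvSup (fun sb => pvG sb t) ts :=
      pv_le_sup _ ts (fun y _ => pvG_nonneg y t) s hs
    have h3 : pvSup (fun sb => pvG sb t) ts
        ≤ pvSup (fun sa => pvSup (fun sb => pvG sb sa) ts) ts :=
      pv_le_sup _ ts (fun y _ => pvSup_nonneg' _ _) t ht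
    omega

-- ===== B-side: the dict invariant =====
-- the key Source B builds for trajectory s at position p
def pvKey (d : Int) (s : String) (p : Nat) : Int × String :=
  ((p : Int), PySem.Str.slice s (some (p : Int)) (some ((p : Int) + d)))

theorem pvKey_snd (d : Int) (hd : 1 ≤ d) (s : String) (p : Nat) :
    (PySem.Str.slice s (some (p : Int)) (some ((p : Int) + d))).toList
      = (s.toList.drop p).take d.toNat := by
  rw [PySem.Str.toList_slice, PySem.Chars.slice_eq_listSlice,
    show (p : Int) + d = (p : Int) + ((d.toNat : Nat) : Int) by
      rw [Int.toNat_of_nonneg (by omega : (0:Int) ≤ d)],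
    PySem.List.slice_natCast_add]

theorem pvKey_eq_iff (d : Int) (hd : 1 ≤ d) (s t : String) (p q : Nat) :
    pvKey d s p = pvKey d t q ↔
      p = q ∧ (s.toList.drop p).take d.toNat = (t.toList.drop p).take d.toNat := by
  unfold pvKey
  constructor
  · intro h
    have h1 : ((p : Int)) = q := congrArg Prod.fst h
    have hp : p = q := by exact_mod_cast h1
    subst hp
    have h2 := congrArg (fun x : Int × String => x.2.toList) h
    simp only at h2
    rw [pvKey_snd d hd s p, pvKey_snd d hd t p] at h2
    exact ⟨rfl, h2⟩
  · rintro ⟨rfl, h2⟩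
    refine Prod.ext rfl ?_
    apply String.toList_inj.mp
    rw [pvKey_snd d hd s p, pvKey_snd d hd t p, h2]

theorem pvColl_mono (l l' : List String) (hsub : ∀ x ∈ l, x ∈ l') (d : Int) :
    pvColl l d → pvColl l' d := by
  rintro ⟨s, hs, t, ht, hst, p, hp, htake⟩
  exact ⟨s, hsub s hs, t, hsub t ht, hst, p, hp, htake⟩

-- invariant after fully processing the trajectories in `done`
def pvInv (d : Int) (done : List String) (st : Bool × PySem.Dict (Int × String) String) : Prop :=
  (st.1 = true → pvColl done d) ∧
  (st.1 = false →
    ¬ pvColl done d ∧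
    (∀ k t, st.2.get? k = some t →
      t ∈ done ∧ ∃ p : Nat, k = pvKey d t p ∧ p + d.toNat ≤ t.toList.length) ∧
    (∀ t ∈ done, ∀ p : Nat, p + d.toNat ≤ t.toList.length →
      (st.2.get? (pvKey d t p)).isSome = true))

-- invariant inside the position loop of trajectory s, positions < q already processed
def pvInvI (d : Int) (done : List String) (s : String) (q : Nat)
    (st : Bool × PySem.Dict (Int × String) String) : Prop :=
  (st.1 = true → pvColl (done ++ [s]) d) ∧
  (st.1 = false →
    ¬ pvColl done d ∧
    (∀ t ∈ done, ∀ p : Nat, p < q → p + d.toNat ≤ s.toList.length →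
      (s.toList.drop p).take d.toNat = (t.toList.drop p).take d.toNat → t = s) ∧
    (∀ k t, st.2.get? k = some t →
      (t ∈ done ∧ ∃ p : Nat, k = pvKey d t p ∧ p + d.toNat ≤ t.toList.length) ∨
      (t = s ∧ ∃ p : Nat, p < q ∧ k = pvKey d s p ∧ p + d.toNat ≤ s.toList.length)) ∧
    (∀ t ∈ done, ∀ p : Nat, p + d.toNat ≤ t.toList.length →
      (st.2.get? (pvKey d t p)).isSome = true) ∧
    (∀ p : Nat, p < q → p + d.toNat ≤ s.toList.length →
      (st.2.get? (pvKey d s p)).isSome = true))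

theorem pvInvI_step (d : Int) (hd : 1 ≤ d) (done : List String) (s : String)
    (hlen : ∀ t ∈ done, t.toList.length = s.toList.length) (q : Nat)
    (hq : q + d.toNat ≤ s.toList.length)
    (st : Bool × PySem.Dict (Int × String) String) (hinv : pvInvI d done s q st) :
    pvInvI d done s (q + 1) (pvBStep d s st ((q : Nat) : Int)) := by
  obtain ⟨htrue, hfalse⟩ := hinv
  unfold pvBStep
  cases hb : st.1 with
  | true =>
      rw [if_pos rfl]
      exact ⟨htrue, fun h => absurd (hb.symm.trans h) (by simp)⟩
  | false =>
      rw [if_neg (by simp)]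
      obtain ⟨hnc, hcol, hdict, hisD, hisS⟩ := hfalse hb
      rw [show (((q : Nat) : Int), PySem.Str.slice s (some ((q : Nat) : Int))
            (some (((q : Nat) : Int) + d))) = pvKey d s q from rfl]
      cases hget : st.2.get? (pvKey d s q) with
      | none =>
          refine ⟨?_, ?_⟩
          · intro h; simp at h
          · intro _
            refine ⟨hnc, ?_, ?_, ?_, ?_⟩
            · -- no collision with s among positions < q+1
              intro t ht p hpq hple htake
              rcases Nat.lt_succ_iff_lt_or_eq.mp hpq with hlt | heq
              · exact hcol t ht p hlt hple htake
              · subst heq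
                exfalso
                have hkeq : pvKey d t p = pvKey d s p :=
                  (pvKey_eq_iff d hd t s p p).mpr ⟨rfl, htake.symm⟩
                have := hisD t ht p (by rw [hlen t ht]; exact hple)
                rw [hkeq, hget] at this
                simp at this
            · -- dict clause
              intro k t hkt
              by_cases hk : k = pvKey d s q
              · subst hk
                rw [PySem.Dict.get?_insert_self] at hkt
                have ht : t = s := by injection hkt with h; exact h.symm
                exact Or.inr ⟨ht, q, by omega, rfl, hq⟩
              · rw [PySem.Dict.get?_insert_of_ne _ _ hk] at hkt
                rcases hdict k t hkt with h | ⟨ht, p, hplt, hkp, hple⟩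
                · exact Or.inl h
                · exact Or.inr ⟨ht, p, by omega, hkp, hple⟩
            · -- isSome for done
              intro t ht p hple
              by_cases hk : pvKey d t p = pvKey d s q
              · rw [hk, PySem.Dict.get?_insert_self]; rfl
              · rw [PySem.Dict.get?_insert_of_ne _ _ hk]
                exact hisD t ht p hple
            · -- isSome for s, p < q+1
              intro p hpq hple
              rcases Nat.lt_succ_iff_lt_or_eq.mp hpq with hlt | heq
              · by_cases hk : pvKey d s p = pvKey d s q
                · rw [hk, PySem.Dict.get?_insert_self]; rfl
                · rw [PySem.Dict.get?_insert_of_ne _ _ hk]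
                  exact hisS p hlt hple
              · subst heq
                rw [PySem.Dict.get?_insert_self]; rfl
      | some t =>
          show pvInvI d done s (q + 1) (if t ≠ s then (true, st.2) else st)
          by_cases hts : t = s
          · rw [if_neg (by simp [hts])]
            refine ⟨?_, ?_⟩
            · intro h; rw [hb] at h; simp at h
            · intro _
              refine ⟨hnc, ?_, ?_, hisD, ?_⟩
              · -- the value stored at this key equals s, hence s itself is in done;
                -- a done-trajectory matching s here would give a collision inside done
                intro t' ht' p hpq hple htake
                rcases Nat.lt_succ_iff_lt_or_eq.mp hpq with hlt | heq
                · exact hcol t' ht' p hlt hple htake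
                · subst heq
                  rcases hdict _ t hget with ⟨htdone, p2, hp2, hple2⟩ | ⟨_, p2, hp2lt, hp2, _⟩
                  · rw [hts] at htdone hp2
                    have hp2q : p = p2 := by
                      have := congrArg Prod.fst hp2
                      simp only [pvKey] at this
                      exact_mod_cast this
                    by_contra hne
                    exact hnc ⟨s, htdone, t', ht', fun h => hne h.symm, p, hple, htake⟩
                  · exfalso
                    have hpp : p = p2 := by
                      have := congrArg Prod.fst hp2
                      simp only [pvKey] at this
                      exact_mod_cast this
                    omega
              · intro k t' hkt
                rcases hdict k t' hkt with h | ⟨ht', p, hplt, hkp, hple⟩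
                · exact Or.inl h
                · exact Or.inr ⟨ht', p, by omega, hkp, hple⟩
              · intro p hpq hple
                rcases Nat.lt_succ_iff_lt_or_eq.mp hpq with hlt | heq
                · exact hisS p hlt hple
                · subst heq
                  rw [hget]; rfl
          · rw [if_pos (by simp [hts])]
            refine ⟨?_, ?_⟩
            · intro _
              -- a genuine collision: the stored t is in done, non-identical to s
              rcases hdict _ t hget with ⟨htdone, p2, hp2, hple2⟩ | ⟨hts', _⟩
              · have hkk := (pvKey_eq_iff d hd t s p2 q).mp hp2.symm
                obtain ⟨hp2q, htk⟩ := hkk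
                subst hp2q
                exact ⟨s, by simp, t, by simp [htdone], fun h => hts h.symm, p2, hq, htk.symm⟩
              · exact absurd hts' hts
            · intro h; simp at h
  
-- run the position loop from 0 to N
theorem pvInvI_run (d : Int) (hd : 1 ≤ d) (done : List String) (s : String)
    (hlen : ∀ t ∈ done, t.toList.length = s.toList.length) :
    ∀ (N : Nat), (∀ q : Nat, q < N → q + d.toNat ≤ s.toList.length) →
    ∀ (st : Bool × PySem.Dict (Int × String) String), pvInvI d done s 0 st →
      pvInvI d done s N ((List.range N).foldl (fun st k => pvBStep d s st ((k : Nat) : Int)) st) := by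
  intro N
  induction N with
  | zero => intro _ st h; simpa using h
  | succ N ih =>
      intro hN st h
      rw [List.range_succ, List.foldl_append, List.foldl_cons, List.foldl_nil]
      exact pvInvI_step d hd done s hlen N (hN N (Nat.lt_succ_self N)) _
        (ih (fun q hq => hN q (Nat.lt_succ_of_lt hq)) st h)

-- entering / leaving the position loop
theorem pvInvI_enter (d : Int) (done : List String) (s : String)
    (st : Bool × PySem.Dict (Int × String) String) (h : pvInv d done st) :
    pvInvI d done s 0 st := by
  obtain ⟨htrue, hfalse⟩ := h
  refine ⟨fun hb => pvColl_mono done _ (by intro x hx; simp [hx]) d (htrue hb), ?_⟩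
  intro hb
  obtain ⟨hnc, hdict, his⟩ := hfalse hb
  exact ⟨hnc, fun t ht p hp => absurd hp (Nat.not_lt_zero p),
    fun k t hkt => Or.inl (hdict k t hkt), his,
    fun p hp => absurd hp (Nat.not_lt_zero p)⟩

theorem pvInvI_exit (d : Int) (hd : 1 ≤ d) (done : List String) (s : String)
    (hlen : ∀ t ∈ done, t.toList.length = s.toList.length)
    (N : Nat) (hN : ∀ p : Nat, p + d.toNat ≤ s.toList.length → p < N)
    (st : Bool × PySem.Dict (Int × String) String) (h : pvInvI d done s N st) :
    pvInv d (done ++ [s]) st := by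
  obtain ⟨htrue, hfalse⟩ := h
  refine ⟨htrue, ?_⟩
  intro hb
  obtain ⟨hnc, hcol, hdict, hisD, hisS⟩ := hfalse hb
  refine ⟨?_, ?_, ?_⟩
  · -- no collision in done ++ [s]
    rintro ⟨x, hx, y, hy, hxy, p, hp, htake⟩
    rcases List.mem_append.mp hx with hx | hx
    · rcases List.mem_append.mp hy with hy | hy
      · exact hnc ⟨x, hx, y, hy, hxy, p, hp, htake⟩
      · -- y = s, x ∈ done
        have hys : y = s := by simpa using hy
        rw [hys] at hxy htake
        have hps : p + d.toNat ≤ s.toList.length := by rw [← hlen x hx]; exact hp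
        exact hxy (hcol x hx p (hN p hps) hps htake.symm)
    · have hxs : x = s := by simpa using hx
      rw [hxs] at hxy hp htake
      rcases List.mem_append.mp hy with hy | hy
      · exact hxy (hcol y hy p (hN p hp) hp htake).symm
      · have hys : y = s := by simpa using hy
        exact hxy hys.symm
  · intro k t hkt
    rcases hdict k t hkt with ⟨ht, p, hkp, hple⟩ | ⟨ht, p, _, hkp, hple⟩
    · exact ⟨List.mem_append.mpr (Or.inl ht), p, hkp, hple⟩
    · exact ⟨by simp [ht], p, by rw [ht]; exact hkp, by rw [ht]; exact hple⟩
  · intro t ht p hple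
    rcases List.mem_append.mp ht with ht | ht
    · exact hisD t ht p hple
    · have hts : t = s := by simpa using ht
      subst hts
      exact hisS p (hN p hple) hple

-- the inner fold of the port is the range fold used above
theorem pvBInner_eq (d L : Int) (s : String)
    (st : Bool × PySem.Dict (Int × String) String) :
    pvBInner d L s st
      = (List.range ((L - d + 1).toNat)).foldl
          (fun st k => pvBStep d s st ((k : Nat) : Int)) st := by
  unfold pvBInner
  rw [PySem.List.pyRange_one, List.foldl_map]
  simp only [sub_zero, zero_add]

-- one outer step preserves the invariant
theorem pvInv_step (d L : Int) (hd : 1 ≤ d) (done : List String) (s : String)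
    (hlen : ∀ t ∈ done, t.toList.length = s.toList.length)
    (hLs : PySem.Str.len s = L)
    (st : Bool × PySem.Dict (Int × String) String) (h : pvInv d done st) :
    pvInv d (done ++ [s]) (if st.1 then st else pvBInner d L s st) := by
  cases hb : st.1 with
  | true =>
      rw [if_pos rfl]
      obtain ⟨htrue, hfalse⟩ := h
      refine ⟨fun _ => pvColl_mono done _ (by intro x hx; simp [hx]) d (htrue hb), ?_⟩
      intro hb'; rw [hb] at hb'; simp at hb'
  | false =>
      rw [if_neg (by simp)]
      set N : Nat := (L - d + 1).toNat with hN
      have hls : L = (s.toList.length : Int) := by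
        rw [← hLs]; simp [PySem.Str.len_eq]
      have hQcov : ∀ q : Nat, q < N → q + d.toNat ≤ s.toList.length := by
        intro q hq
        rw [hN, hls] at hq
        omega
      have hNcov : ∀ p : Nat, p + d.toNat ≤ s.toList.length → p < N := by
        intro p hp
        rw [hN, hls]
        omega
      rw [pvBInner_eq]
      exact pvInvI_exit d hd done s hlen N hNcov _
        (pvInvI_run d hd done s hlen N hQcov st (pvInvI_enter d done s st h))

theorem pvInv_fold (d L : Int) (hd : 1 ≤ d) :
    ∀ (todo done : List String),
      (∀ x ∈ done, ∀ y ∈ todo, x.toList.length = y.toList.length) →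
      (∀ x ∈ todo, ∀ y ∈ todo, x.toList.length = y.toList.length) →
      (∀ x ∈ todo, PySem.Str.len x = L) →
      ∀ st, pvInv d done st →
        pvInv d (done ++ todo)
          (todo.foldl (fun st s => if st.1 then st else pvBInner d L s st) st) := by
  intro todo
  induction todo with
  | nil => intro done _ _ _ st h; simpa using h
  | cons s rest ih =>
      intro done hdt htt hLall st h
      rw [List.foldl_cons]
      have h1 : pvInv d (done ++ [s]) (if st.1 then st else pvBInner d L s st) :=
        pvInv_step d L hd done s (fun t ht => hdt t ht s (by simp))
          (hLall s (by simp)) st h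
      have h2 := ih (done ++ [s])
        (by
          intro x hx y hy
          rcases List.mem_append.mp hx with hx | hx
          · exact hdt x hx y (by simp [hy])
          · have : x = s := by simpa using hx
            subst this
            exact htt x (by simp) y (by simp [hy]))
        (fun x hx y hy => htt x (by simp [hx]) y (by simp [hy]))
        (fun x hx => hLall x (by simp [hx]))
        _ h1
      rw [List.append_assoc] at h2
      simpa using h2

-- B returns true exactly on a collision (duration ≥ 1, equal lengths)
theorem pvB_iff (ts : List String) (d L : Int) (hd : 1 ≤ d)
    (hlen : ∀ s ∈ ts, ∀ t ∈ ts, s.toList.length = t.toList.length)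
    (hLall : ∀ s ∈ ts, PySem.Str.len s = L) :
    ((ts.foldl (fun st s => if st.1 then st else pvBInner d L s st)
        (false, PySem.Dict.empty)).1 = true) ↔ pvColl ts d := by
  have h0 : pvInv d [] ((false, PySem.Dict.empty) :
      Bool × PySem.Dict (Int × String) String) := by
    refine ⟨by intro h; simp at h, ?_⟩
    intro _
    refine ⟨?_, ?_, ?_⟩
    · rintro ⟨s, hs, _⟩; cases hs
    · intro k t hkt
      rw [PySem.Dict.get?_empty] at hkt
      cases hkt
    · intro t ht; cases ht
  have hres := pvInv_fold d L hd ts [] (by intro x hx; cases hx) hlen hLall _ h0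
  rw [List.nil_append] at hres
  obtain ⟨htrue, hfalse⟩ := hres
  constructor
  · exact htrue
  · intro hcoll
    by_contra hb
    have : (ts.foldl (fun st s => if st.1 then st else pvBInner d L s st)
        (false, PySem.Dict.empty)).1 = false := by
      cases h : (ts.foldl (fun st s => if st.1 then st else pvBInner d L s st)
          (false, PySem.Dict.empty)).1
      · rfl
      · exact absurd h hb
    exact (hfalse this).1 hcoll

-- the length set: a nonempty constant list of lengths collapses to a singleton
theorem pvOfList_const {α : Type} [BEq α] [LawfulBEq α] (c : α) :
    ∀ l : List α, (∀ x ∈ l, x = c) → l ≠ [] → PySem.Set.ofList l = [c] := by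
  intro l
  induction l with
  | nil => intro _ h; exact absurd rfl h
  | cons x xs ih =>
      intro hc _
      have hx : x = c := hc x (by simp)
      subst hx
      rw [PySem.Set.ofList_cons]
      have hdis : PySem.Set.discard (PySem.Set.ofList xs) x = [] := by
        apply List.eq_nil_iff_forall_not_mem.mpr
        intro y hy
        simp only [PySem.Set.mem_discard, PySem.Set.mem_ofList] at hy
        exact hy.2 (hc y (by simp [hy.1]))
      rw [hdis]

-- ===== VERDICT (by name: the statement is the Claim_ definition above) =====
theorem swarm_busyb_spec : Claim_equal_swarm_busyb := by
  intro ts dur _ hpre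
  obtain ⟨hne, hlen⟩ := hpre
  unfold Spec_swarm_busyb swarm_busyb_alt
  rw [pvAval ts dur hne hlen]
  obtain ⟨s0, rest, rfl⟩ : ∃ s0 rest, ts = s0 :: rest := by
    cases ts with
    | nil => exact absurd rfl hne
    | cons a l => exact ⟨a, l, rfl⟩
  set ts := s0 :: rest with hts
  have hLall : ∀ s ∈ ts, PySem.Str.len s = PySem.Str.len s0 := by
    intro s hs
    simp only [PySem.Str.len_eq]
    exact_mod_cast hlen s hs s0 (by simp [hts])
  have hset : PySem.Set.ofList (ts.map (fun s => PySem.Str.len s)) = [PySem.Str.len s0] := by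
    apply pvOfList_const
    · intro x hx
      rcases List.mem_map.mp hx with ⟨s, hs, rfl⟩
      exact hLall s hs
    · simp [hts]
  rw [hset]
  show decide (dur ≤ pvSup (fun sa => pvSup (fun sb => pvG sb sa) ts) ts)
      = (if dur ≤ 0 then true
         else (ts.foldl (fun st s => if st.1 then st else pvBInner dur (PySem.Str.len s0) s st)
           (false, PySem.Dict.empty)).1)
  by_cases hd : dur ≤ 0
  · rw [if_pos hd]
    have := pvSup_nonneg' (fun sa => pvSup (fun sb => pvG sb sa) ts) ts
    simp
    omega
  · rw [if_neg hd]
    have hd1 : 1 ≤ dur := by omega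
    have hiff := (pvA_iff ts dur hd1 hlen).trans
      (pvB_iff ts dur (PySem.Str.len s0) hd1 hlen hLall).symm
    cases hB : (ts.foldl (fun st s => if st.1 then st else pvBInner dur (PySem.Str.len s0) s st)
        (false, PySem.Dict.empty)).1
    · simp only [decide_eq_false_iff_not]
      intro hle
      rw [hiff.mp hle] at hB
      cases hB
    · simp only [decide_eq_true_eq]
      exact hiff.mpr hB
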